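-- pv_equiv track=rewrite | github.com/rajat9para/Code-Bridge-multi-coding-languge-transpiler | backend/transpiler/code_transpiler.py | _find_leading_insert_index
-- ===== SOURCE A (Python) =====
-- from typing import Dict, List, Optional, Tuple
--
-- def _find_leading_insert_index(lines: List[str]) -> int:
--     """Find insertion point after leading comments and blank lines."""
--     idx = 0
--     while idx < len(lines):
--         stripped = lines[idx].strip()
--         if stripped == '':
--             idx += 1
--             continue
--         if stripped.startswith('//') or stripped.startswith('#'):
--             idx += 1
--             continue
--         if stripped.startswith('/*'):
--             idx += 1
--             while idx < len(lines) and '*/' not in lines[idx]: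
--                 idx += 1
--             if idx < len(lines):
--                 idx += 1
--             continue
--         break
--     return idx
-- ===== SOURCE B (Python) =====
-- def _find_leading_insert_index(lines):
--     """Find insertion point after leading comments and blank lines.
--
--     Recursive count-based decomposition: returns the number of skipped
--     leading lines; each /* block is consumed by a first-match search for
--     its terminator plus slicing, not by an index-mutating inner while.
--     """
--     def skip(rest):
--         if not rest:
--             return 0
--         s = rest[0].strip()
--         if s == '' or s.startswith('//') or s.startswith('#'):
--             return 1 + skip(rest[1:])
--         if s.startswith('/*'):
--             body = rest[1:]
--             j = next((i for i, l in enumerate(body) if '*/' in l), None)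
--             if j is None:
--                 return len(rest)
--             return 2 + j + skip(body[j + 1:])
--         return 0
--     return skip(lines)
-- ===== Notes on version B (the rewrite author's own statement) =====
-- stated objective: alternative
-- what changed: Replaces A's index-mutating outer while with a nested inner while by a recursive count-based decomposition: a recursive helper returns the number of leading skipped lines, and each /* block is consumed by a first-match search (next over enumerate) for the terminator plus list slicing.
import Mathlib
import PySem

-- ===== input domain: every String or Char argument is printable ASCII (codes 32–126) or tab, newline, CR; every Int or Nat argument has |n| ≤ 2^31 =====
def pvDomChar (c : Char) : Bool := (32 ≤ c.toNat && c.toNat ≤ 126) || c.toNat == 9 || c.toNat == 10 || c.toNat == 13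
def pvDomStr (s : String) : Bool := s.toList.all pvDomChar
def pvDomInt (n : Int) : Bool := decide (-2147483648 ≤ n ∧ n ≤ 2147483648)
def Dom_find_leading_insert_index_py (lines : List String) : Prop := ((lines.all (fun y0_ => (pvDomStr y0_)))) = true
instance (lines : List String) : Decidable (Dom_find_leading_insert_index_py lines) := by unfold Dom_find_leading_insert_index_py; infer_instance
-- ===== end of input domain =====

-- B replaces A's index-mutating nested while loops by a recursive helper that returns the COUNT of
-- skipped lines, locating each block-comment terminator with a first-match index search plus slicing;
-- objective: alternative decomposition, same cost.

-- ===== PORT A =====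
-- inner while: `while idx < len(lines) and '*/' not in lines[idx]: idx += 1`
-- fuel (lines.length at the top call) only makes the while loops total; it never changes the value
def pvA_inner (lines : List String) : Nat → Nat → Nat
  | idx, 0 => idx
  | idx, fuel + 1 =>
    if h : idx < lines.length then
      if PySem.Str.isIn "*/" lines[idx] then idx
      else pvA_inner lines (idx + 1) fuel
    else idx

-- outer while over idx, branches in A's order
def pvA_loop (lines : List String) : Nat → Nat → Nat
  | idx, 0 => idx
  | idx, fuel + 1 =>
    if h : idx < lines.length then
      let stripped := PySem.Str.strip lines[idx]
      if stripped = "" then pvA_loop lines (idx + 1) fuel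
      else if PySem.Str.startswith stripped "//" || PySem.Str.startswith stripped "#" then
        pvA_loop lines (idx + 1) fuel
      else if PySem.Str.startswith stripped "/*" then
        let j := pvA_inner lines (idx + 1) fuel
        let j' := if j < lines.length then j + 1 else j
        pvA_loop lines j' fuel
      else idx
    else idx

def find_leading_insert_index_py (lines : List String) : Int :=
  (pvA_loop lines 0 lines.length : Int)

-- ===== PORT B =====
-- recursive `skip`: count of leading skipped lines; `next((i for i,l in enumerate(body) if '*/' in l), None)`
-- is the first-match index search List.findIdx?, `body[j+1:]` is List.drop (j+1)
def pvB_skip : List String → Nat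
  | [] => 0
  | line :: rest =>
    let s := PySem.Str.strip line
    if s = "" || PySem.Str.startswith s "//" || PySem.Str.startswith s "#" then
      1 + pvB_skip rest
    else if PySem.Str.startswith s "/*" then
      match List.findIdx? (fun l => PySem.Str.isIn "*/" l) rest with
      | some j => 2 + j + pvB_skip (rest.drop (j + 1))
      | none => (line :: rest).length
    else 0
termination_by rest => rest.length
decreasing_by all_goals simp only [List.length_drop, List.length_cons]; omega

def find_leading_insert_index_py_alt (lines : List String) : Int :=
  (pvB_skip lines : Int)

-- ===== PRECONDITION & SPEC =====
def Spec_find_leading_insert_index_py (lines : List String) (out : Int) : Prop := out = find_leading_insert_index_py_alt lines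
instance (lines : List String) (out : Int) : Decidable (Spec_find_leading_insert_index_py lines out) := by unfold Spec_find_leading_insert_index_py; infer_instance

-- ===== CLAIM (what is proved, stated in full; the proofs are below) =====
def Claim_equal_find_leading_insert_index_py : Prop := ∀ (lines : List String), Dom_find_leading_insert_index_py lines → Spec_find_leading_insert_index_py lines (find_leading_insert_index_py lines)

-- ===== LEMMAS AND PROOFS =====

theorem pvA_loop_stop (lines : List String) (idx : Nat) (h : ¬ idx < lines.length) :
    ∀ f, pvA_loop lines idx f = idx
  | 0 => rfl
  | f + 1 => by simp only [pvA_loop, dif_neg h]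

-- A's inner scan from idx = idx + index of first line containing '*/' (or scan to the end)
theorem pvA_inner_char (lines : List String) :
    ∀ (f idx : Nat), lines.length - idx ≤ f → idx ≤ lines.length →
      pvA_inner lines idx f =
        idx + ((List.findIdx? (fun l => PySem.Str.isIn "*/" l) (lines.drop idx)).getD
                  (lines.length - idx)) := by
  intro f
  induction f with
  | zero =>
    intro idx hf hle
    have : idx = lines.length := by omega
    subst this
    simp [pvA_inner, List.drop_length]
  | succ f ih =>
    intro idx hf hle
    by_cases h : idx < lines.length
    · have hdrop : lines.drop idx = lines[idx] :: lines.drop (idx + 1) :=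
        (List.getElem_cons_drop h).symm
      rw [hdrop, List.findIdx?_cons]
      simp only [pvA_inner, dif_pos h]
      by_cases hc : PySem.Str.isIn "*/" lines[idx] = true
      · rw [if_pos hc, if_pos hc]; simp
      · rw [if_neg hc, if_neg hc]
        rw [ih (idx + 1) (by omega) (by omega)]
        cases hfi : List.findIdx? (fun l => PySem.Str.isIn "*/" l) (lines.drop (idx + 1)) with
        | some k => simp; omega
        | none => simp; omega
    · have : idx = lines.length := by omega
      subst this
      simp [pvA_inner, List.drop_length]

-- A's outer loop from idx = idx + B's count of skipped lines in the tail
theorem pvA_loop_eq_skip (lines : List String) :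
    ∀ (f idx : Nat), lines.length - idx ≤ f →
      pvA_loop lines idx f = idx + pvB_skip (lines.drop idx) := by
  intro f
  induction f with
  | zero =>
    intro idx hf
    have hdrop : lines.drop idx = [] := List.drop_eq_nil_of_le (by omega)
    simp [pvA_loop, hdrop, pvB_skip]
  | succ f ih =>
    intro idx hf
    by_cases h : idx < lines.length
    · have hdrop : lines.drop idx = lines[idx] :: lines.drop (idx + 1) :=
        (List.getElem_cons_drop h).symm
      rw [hdrop]
      simp only [pvA_loop, dif_pos h, pvB_skip, Bool.or_eq_true, decide_eq_true_eq]
      by_cases h1 : PySem.Str.strip lines[idx] = ""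
      · rw [if_pos h1, if_pos (Or.inl (Or.inl h1)), ih (idx + 1) (by omega)]
        omega
      · by_cases h2 : PySem.Str.startswith (PySem.Str.strip lines[idx]) "//" = true ∨
            PySem.Str.startswith (PySem.Str.strip lines[idx]) "#" = true
        · rw [if_neg h1, if_pos h2,
            if_pos (h2.elim (fun x => Or.inl (Or.inr x)) Or.inr), ih (idx + 1) (by omega)]
          omega
        · rw [if_neg h1, if_neg h2, if_neg (fun hor => hor.elim
            (fun hor2 => hor2.elim h1 (fun x => h2 (Or.inl x)))
            (fun x => h2 (Or.inr x)) :
            ¬((PySem.Str.strip lines[idx] = "" ∨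
                PySem.Str.startswith (PySem.Str.strip lines[idx]) "//" = true) ∨
              PySem.Str.startswith (PySem.Str.strip lines[idx]) "#" = true))]
          by_cases h3 : PySem.Str.startswith (PySem.Str.strip lines[idx]) "/*" = true
          · rw [if_pos h3, if_pos h3]
            rw [pvA_inner_char lines f (idx + 1) (by omega) (by omega)]
            cases hfi : List.findIdx? (fun l => PySem.Str.isIn "*/" l) (lines.drop (idx + 1)) with
            | some k =>
              have hk : k < (lines.drop (idx + 1)).length :=
                ((List.findIdx?_eq_some_iff_findIdx_eq).mp hfi).1
              rw [List.length_drop] at hk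
              simp only [Option.getD_some]
              rw [if_pos (by omega : idx + 1 + k < lines.length)]
              rw [ih (idx + 1 + k + 1) (by omega)]
              rw [List.drop_drop]
              have harith : idx + 1 + (k + 1) = idx + 1 + k + 1 := by omega
              rw [harith]
              omega
            | none =>
              simp only [Option.getD_none]
              have hlen : idx + 1 + (lines.length - (idx + 1)) = lines.length := by omega
              rw [hlen, if_neg (by omega : ¬ lines.length < lines.length),
                pvA_loop_stop lines lines.length (by omega) f]
              simp only [List.length_cons, List.length_drop]
              omega
          · rw [if_neg h3, if_neg h3]; omega
    · have hdrop : lines.drop idx = [] := List.drop_eq_nil_of_le (by omega)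
      simp [pvA_loop, dif_neg h, hdrop, pvB_skip]

-- ===== VERDICT (by name: the statement is the Claim_ definition above) =====
theorem find_leading_insert_index_py_spec : Claim_equal_find_leading_insert_index_py := by
  intro lines _
  unfold Spec_find_leading_insert_index_py find_leading_insert_index_py find_leading_insert_index_py_alt
  have := pvA_loop_eq_skip lines lines.length 0 (by omega)
  simp only [List.drop_zero] at this
  rw [this]
  simp
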